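-- pv_equiv track=rewrite | github.com/tchamna/document-compare-app | core/helpers.py | word_diff_pairs
-- ===== SOURCE A (Python) =====
-- from typing import List, Tuple
--
-- def word_diff_pairs(text1: str, text2: str) -> List[Tuple[str, bool]]:
--     """
--     Compare two sentences word-by-word.
--     Returns [(word, is_different), ...] for *text1*.
--     """
--     words1 = text1.split()
--     words2 = text2.split()
--
--     result: List[Tuple[str, bool]] = []
--     for w1, w2 in zip(words1, words2):
--         result.append((w1, w1 != w2))
--
--     # Extra words in either list are always "different"
--     if len(words1) > len(words2):
--         for w in words1[len(words2):]:
--             result.append((w, True))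
--     elif len(words2) > len(words1):
--         for w in words2[len(words1):]:
--             result.append((w, True))
--
--     return result
-- ===== SOURCE B (Python) =====
-- from typing import List, Tuple
--
-- def word_diff_pairs(text1: str, text2: str) -> List[Tuple[str, bool]]:
--     """Word-by-word diff via a single recursive merge of the two word lists."""
--     def merge(ws1, ws2):
--         if not ws1 and not ws2:
--             return []
--         if not ws1:
--             return [(ws2[0], True)] + merge(ws1, ws2[1:])
--         if not ws2:
--             return [(ws1[0], True)] + merge(ws1[1:], ws2)
--         return [(ws1[0], ws1[0] != ws2[0])] + merge(ws1[1:], ws2[1:])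
--     return merge(text1.split(), text2.split())
-- ===== Notes on version B (the rewrite author's own statement) =====
-- stated objective: simpler
-- what changed: Replaces zip-loop plus two separate tail-copy branches by a single recursive merge of the two word lists that handles the common and tail parts in one traversal.
import Mathlib
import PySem

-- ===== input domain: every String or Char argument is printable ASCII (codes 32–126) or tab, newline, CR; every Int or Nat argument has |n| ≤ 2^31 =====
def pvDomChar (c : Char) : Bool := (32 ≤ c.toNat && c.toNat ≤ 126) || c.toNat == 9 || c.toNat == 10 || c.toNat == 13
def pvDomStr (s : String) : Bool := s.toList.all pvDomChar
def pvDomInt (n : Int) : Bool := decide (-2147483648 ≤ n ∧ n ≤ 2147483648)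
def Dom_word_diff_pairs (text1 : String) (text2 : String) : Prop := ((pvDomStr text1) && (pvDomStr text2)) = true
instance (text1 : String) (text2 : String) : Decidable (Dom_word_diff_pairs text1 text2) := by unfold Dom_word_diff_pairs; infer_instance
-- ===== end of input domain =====

-- B replaces A's zip loop plus two tail-copy branches by one recursive merge; objective: simpler.

-- ===== PORT A =====
def word_diff_pairs (text1 : String) (text2 : String) : List (String × Bool) :=
  let words1 := PySem.Str.split₀ text1
  let words2 := PySem.Str.split₀ text2
  let result := (words1.zip words2).foldl (fun acc p => acc ++ [(p.1, p.1 != p.2)]) []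
  if PySem.List.len words1 > PySem.List.len words2 then
    (PySem.List.slice words1 (some (PySem.List.len words2)) none).foldl
      (fun acc w => acc ++ [(w, true)]) result
  else if PySem.List.len words2 > PySem.List.len words1 then
    (PySem.List.slice words2 (some (PySem.List.len words1)) none).foldl
      (fun acc w => acc ++ [(w, true)]) result
  else result

-- ===== PORT B =====
def wdpMerge : List String → List String → List (String × Bool)
  | [], [] => []
  | [], w2 :: ws2 => (w2, true) :: wdpMerge [] ws2
  | w1 :: ws1, [] => (w1, true) :: wdpMerge ws1 []
  | w1 :: ws1, w2 :: ws2 => (w1, w1 != w2) :: wdpMerge ws1 ws2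

def word_diff_pairs_alt (text1 : String) (text2 : String) : List (String × Bool) :=
  wdpMerge (PySem.Str.split₀ text1) (PySem.Str.split₀ text2)

-- ===== PRECONDITION & SPEC =====
def Spec_word_diff_pairs (text1 : String) (text2 : String) (out : List (String × Bool)) : Prop := out = word_diff_pairs_alt text1 text2
instance (text1 : String) (text2 : String) (out : List (String × Bool)) : Decidable (Spec_word_diff_pairs text1 text2 out) := by unfold Spec_word_diff_pairs; infer_instance

-- ===== CLAIM (what is proved, stated in full; the proofs are below) =====
def Claim_equal_word_diff_pairs : Prop := ∀ (text1 : String) (text2 : String), Dom_word_diff_pairs text1 text2 → Spec_word_diff_pairs text1 text2 (word_diff_pairs text1 text2)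

-- ===== LEMMAS AND PROOFS =====

-- B's merge on an empty right list marks every left word different.
theorem wdpMerge_nil_right (ws : List String) :
    wdpMerge ws [] = ws.map (fun w => (w, true)) := by
  induction ws with
  | nil => simp [wdpMerge]
  | cons x xs ih => simp [wdpMerge, ih]

-- B's merge, characterised: zipped prefix, then whichever tail is longer (all-true).
theorem wdpMerge_eq (ws1 ws2 : List String) :
    wdpMerge ws1 ws2 =
      (ws1.zip ws2).map (fun p => (p.1, p.1 != p.2)) ++
        (if ws2.length < ws1.length then (ws1.drop ws2.length).map (fun w => (w, true))
         else (ws2.drop ws1.length).map (fun w => (w, true))) := by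
  induction ws1 generalizing ws2 with
  | nil =>
    induction ws2 with
    | nil => simp [wdpMerge]
    | cons w2 ws2 ih => simp [wdpMerge, ih]
  | cons w1 ws1 ih =>
    cases ws2 with
    | nil => simp [wdpMerge_nil_right]
    | cons w2 ws2 => simp [wdpMerge, ih ws2]

-- ===== VERDICT (by name: the statement is the Claim_ definition above) =====

theorem word_diff_pairs_spec : Claim_equal_word_diff_pairs := by
  intro text1 text2 _
  unfold Spec_word_diff_pairs word_diff_pairs word_diff_pairs_alt
  set ws1 := PySem.Str.split₀ text1
  set ws2 := PySem.Str.split₀ text2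
  have hzip : (ws1.zip ws2).foldl (fun acc p => acc ++ [(p.1, p.1 != p.2)]) [] =
      (ws1.zip ws2).map (fun p => (p.1, p.1 != p.2)) := by
    simpa using PySem.List.foldl_append_singleton_eq_map
      (fun p : String × String => (p.1, p.1 != p.2)) (ws1.zip ws2) []
  have htail : ∀ (ws : List String) (init : List (String × Bool)),
      ws.foldl (fun acc w => acc ++ [(w, true)]) init =
        init ++ ws.map (fun w => (w, true)) :=
    fun ws init => PySem.List.foldl_append_singleton_eq_map (fun w => (w, true)) ws init
  rw [wdpMerge_eq]
  simp only [PySem.List.len_eq, gt_iff_lt, Nat.cast_lt, hzip,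
    PySem.List.slice_from_natCast]
  by_cases h1 : ws2.length < ws1.length
  · rw [if_pos h1, if_pos h1, htail]
  · rw [if_neg h1, if_neg h1]
    by_cases h2 : ws1.length < ws2.length
    · rw [if_pos h2, htail]
    · rw [if_neg h2]
      have h3 : ws1.length = ws2.length := by omega
      simp [h3]
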